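-- pv_equiv track=rewrite | github.com/AhmedSimeda/Project_Euler | Problem 54/poker_hands_V2.py | get_High_Card
-- ===== SOURCE A (Python) =====
-- def get_High_Card(cards):
--     Card = ''
--     for card in range(0,len(cards),2):
--         Card += cards[card]
--
--     order = '23456789TJQKA'
--
--     for i in order[::-1]:
--         if i in Card:
--             return i
-- ===== SOURCE B (Python) =====
-- def get_High_Card(cards):
--     order = '23456789TJQKA'
--     ranks = set(cards[::2]) & set(order)
--     return max(ranks, key=order.index) if ranks else None
-- ===== Notes on version B (the rewrite author's own statement) =====
-- stated objective: idiomatic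
-- what changed: B drops A's build-a-string-then-scan-the-order-string-downward loop and instead intersects the set of rank characters at even positions with the order alphabet and takes max(..., key=order.index) in one expression.
-- outside the precondition, e.g. on get_High_Card(''): A returns None, B returns None; on get_High_Card('Xx'): A returns None, B returns None
import Mathlib
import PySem

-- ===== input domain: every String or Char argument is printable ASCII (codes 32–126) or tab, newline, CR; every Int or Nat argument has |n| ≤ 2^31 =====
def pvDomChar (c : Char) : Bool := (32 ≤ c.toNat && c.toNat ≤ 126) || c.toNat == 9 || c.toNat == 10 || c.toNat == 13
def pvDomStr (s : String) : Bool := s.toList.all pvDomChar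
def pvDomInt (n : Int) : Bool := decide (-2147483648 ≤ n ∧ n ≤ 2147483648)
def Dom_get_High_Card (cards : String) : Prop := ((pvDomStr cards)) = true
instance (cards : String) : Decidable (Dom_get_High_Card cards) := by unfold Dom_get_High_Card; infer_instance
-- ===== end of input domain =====

-- B replaces A's downward scan of the 13-char order string ('first rank present wins') by a
-- single max-by-rank-index over the set of rank characters actually in the hand (idiomatic).
-- Equivalence is about the RETURN value; neither program mutates its argument.

-- ===== PORT A =====
def get_High_Card (cards : String) : String :=
  let cs := cards.toList
  -- Card = ''; for card in range(0, len(cards), 2): Card += cards[card]   (index always in range)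
  let Card : List Char := (PySem.List.pyRange 0 (cs.length : Int) 2).foldl
      (fun acc i => acc ++ [PySem.List.pyGetD cs i ' ']) []
  let order := "23456789TJQKA".toList
  -- for i in order[::-1]:  if i in Card: return i       ('i in Card' is single-char membership)
  match ((PySem.List.slice? order none none (-1)).getD []).find? (fun i => Card.contains i) with
  | some c => String.ofList [c]
  | none => ""   -- Python falls through and returns None here; excluded by Pre_

-- ===== PORT B =====
def get_High_Card_alt (cards : String) : String :=
  let order := "23456789TJQKA".toList
  -- ranks = set(cards[::2]) & set(order)
  let ranks : PySem.Set Char :=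
    PySem.Set.inter (PySem.Set.ofList ((PySem.List.slice? cards.toList none none 2).getD []))
      (PySem.Set.ofList order)
  -- max(ranks, key=order.index) if ranks else None  (key injective on ranks, so set order is moot)
  match PySem.List.max? ranks (fun c => List.idxOf c order) with
  | some c => String.ofList [c]
  | none => ""   -- Python returns None here; excluded by Pre_

-- ===== PRECONDITION & SPEC =====
-- the characters of cards at even indices
def pvEvens {α : Type} : List α → List α
  | [] => []
  | [a] => [a]
  | a :: _ :: t => a :: pvEvens t

-- Pre_ excludes exactly the inputs (no rank character at any even index) on which Python A
-- falls through both loops and returns None, which is not a String.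
def Pre_get_High_Card (cards : String) : Prop :=
  ((pvEvens cards.toList).any (fun c => "23456789TJQKA".toList.contains c)) = true
instance (cards : String) : Decidable (Pre_get_High_Card cards) := by
  unfold Pre_get_High_Card; infer_instance

def pvWitness_get_High_Card : String := "5H 2D KC"

def Spec_get_High_Card (cards : String) (out : String) : Prop := out = get_High_Card_alt cards
instance (cards : String) (out : String) : Decidable (Spec_get_High_Card cards out) := by unfold Spec_get_High_Card; infer_instance

-- ===== CLAIM (what is proved, stated in full; the proofs are below) =====
def Claim_equal_get_High_Card : Prop := ∀ (cards : String), Dom_get_High_Card cards → Pre_get_High_Card cards → Spec_get_High_Card cards (get_High_Card cards)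

-- ===== LEMMAS AND PROOFS =====

-- both ports' "even characters" computations equal pvEvens
theorem pv_map_range_evens (cs : List Char) (d : Char) :
    (List.range ((cs.length + 1) / 2)).map (fun k => cs.getD (2 * k) d) = pvEvens cs := by
  induction cs using pvEvens.induct with
  | case1 => simp [pvEvens]
  | case2 a => simp [pvEvens]
  | case3 a b t ih =>
    have hlen : ((a :: b :: t).length + 1) / 2 = (t.length + 1) / 2 + 1 := by
      simp [List.length_cons]; omega
    rw [hlen, List.range_succ_eq_map, List.map_cons, List.map_map]
    have hmap : List.map ((fun k => (a :: b :: t).getD (2 * k) d) ∘ Nat.succ)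
        (List.range ((t.length + 1) / 2)) =
        List.map (fun k => t.getD (2 * k) d) (List.range ((t.length + 1) / 2)) := by
      apply List.map_congr_left
      intro k _
      simp only [Function.comp_apply, Nat.succ_eq_add_one]
      have h2 : 2 * (k + 1) = 2 * k + 1 + 1 := by ring
      simp [h2]
    rw [hmap, ih]
    simp [pvEvens]

theorem pv_cardA_eq (cs : List Char) (d : Char) :
    (PySem.List.pyRange 0 (cs.length : Int) 2).foldl
      (fun acc i => acc ++ [PySem.List.pyGetD cs i d]) [] = pvEvens cs := by
  rw [PySem.List.pyRange_of_pos 0 (cs.length : Int) (by omega)]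
  have hcnt : (if (0:Int) < (cs.length : Int)
      then (((cs.length : Int) - 0 + 2 - 1) / 2).toNat else 0) = (cs.length + 1) / 2 := by
    split_ifs with h
    · omega
    · omega
  rw [hcnt, List.foldl_map, ← pv_map_range_evens cs d]
  simp only [PySem.List.foldl_append_singleton_eq_map, List.nil_append]
  apply List.map_congr_left
  intro k _
  have hcast : (0 : Int) + 2 * (k : Int) = ((2 * k : Nat) : Int) := by push_cast; ring
  rw [hcast, PySem.List.pyGetD_natCast]

theorem pv_sliceB_eq (cs : List Char) (d : Char) :
    (PySem.List.slice? cs none none 2).getD [] = pvEvens cs := by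
  have h1 : (PySem.List.slice? cs none none 2).getD [] =
      List.filterMap (fun k : Nat => cs[(2 * (k:Int)).toNat]?)
        (List.range (if (0:Int) < (cs.length:Int)
          then (((cs.length:Int) + 2 - 1) / 2).toNat else 0)) := by
    simp only [PySem.List.slice?, PySem.List.sliceIndices]
    norm_num [List.flatMap_singleton', List.filterMap_map]
  have hcnt : (if (0:Int) < (cs.length:Int)
      then (((cs.length:Int) + 2 - 1) / 2).toNat else 0) = (cs.length + 1) / 2 := by
    split_ifs with h
    · omega
    · omega
  rw [h1, hcnt, ← pv_map_range_evens cs d]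
  have hsome : ∀ k ∈ List.range ((cs.length + 1) / 2),
      cs[(2 * (k:Int)).toNat]? = some (cs.getD (2 * k) d) := by
    intro k hk
    have hk' : k < (cs.length + 1) / 2 := List.mem_range.mp hk
    have h2k : 2 * k < cs.length := by omega
    have ht : ((2 : Int) * (k:Int)).toNat = 2 * k := by omega
    rw [ht, List.getElem?_eq_getElem h2k, List.getD_eq_getElem cs d h2k]
  calc List.filterMap (fun k : Nat => cs[(2 * (k:Int)).toNat]?) (List.range ((cs.length + 1) / 2))
      = List.filterMap (fun k : Nat => some (cs.getD (2 * k) d)) (List.range ((cs.length + 1) / 2)) :=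
        List.filterMap_congr hsome
    _ = (List.range ((cs.length + 1) / 2)).map (fun k => cs.getD (2 * k) d) := by
        simp

-- A's reversed-order scan finds the present rank with the largest index in order
theorem pv_find_rev_max (L : List Char) (hnd : L.Nodup) (p : Char → Bool) (c : Char)
    (hc : c ∈ L) (hp : p c = true) :
    ∃ m, L.reverse.find? p = some m ∧ p m = true ∧ m ∈ L ∧
      ∀ y ∈ L, p y = true → List.idxOf y L ≤ List.idxOf m L := by
  induction L using List.reverseRecOn with
  | nil => simp at hc
  | append_singleton l x ih =>
    rw [List.reverse_append, List.reverse_singleton, List.singleton_append, List.find?_cons]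
    have hnd' : l.Nodup := (List.nodup_append.mp hnd).1
    have hxl : x ∉ l := by
      have hdisj := (List.nodup_append.mp hnd).2.2
      exact fun hmem => hdisj x hmem x (by simp) rfl
    by_cases hpx : p x = true
    · refine ⟨x, by simp [hpx], hpx, by simp, ?_⟩
      intro y hy _
      have hxidx : List.idxOf x (l ++ [x]) = l.length := by
        rw [List.idxOf_append]
        simp [hxl]
      rcases List.mem_append.mp hy with hyl | hyx
      · calc List.idxOf y (l ++ [x]) = List.idxOf y l := List.idxOf_append_of_mem hyl
          _ ≤ l.length := List.idxOf_le_length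
          _ = List.idxOf x (l ++ [x]) := hxidx.symm
      · simp only [List.mem_singleton] at hyx
        subst hyx
        exact le_refl _
    · simp only [hpx]

      have hcl : c ∈ l := by
        rcases List.mem_append.mp hc with h | h
        · exact h
        · simp only [List.mem_singleton] at h
          subst h
          exact absurd hp (by simp [hpx])
      obtain ⟨m, hfind, hpm, hml, hmax⟩ := ih hnd' hcl
      refine ⟨m, hfind, hpm, List.mem_append_left _ hml, ?_⟩
      intro y hy hpy
      rcases List.mem_append.mp hy with hyl | hyx
      · rw [List.idxOf_append_of_mem hyl, List.idxOf_append_of_mem hml]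
        exact hmax y hyl hpy
      · simp only [List.mem_singleton] at hyx
        subst hyx
        exact absurd hpy (by simp [hpx])

-- ===== VERDICT (by name: the statement is the Claim_ definition above) =====
theorem get_High_Card_spec : Claim_equal_get_High_Card := by
  unfold Claim_equal_get_High_Card
  intro cards _ hpre
  unfold Pre_get_High_Card at hpre
  rw [List.any_eq_true] at hpre
  obtain ⟨c, hcE, hcL⟩ := hpre
  rw [List.contains_iff_mem] at hcL
  unfold Spec_get_High_Card get_High_Card get_High_Card_alt
  simp only [pv_cardA_eq _ ' ', pv_sliceB_eq _ ' ', PySem.List.slice?_none_none_neg_one,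
    Option.getD_some]
  set L := "23456789TJQKA".toList with hL
  set E := pvEvens cards.toList with hE
  have hnd : L.Nodup := by rw [hL]; decide
  obtain ⟨m, hfind, hpm, hmL, hmax⟩ :=
    pv_find_rev_max L hnd (fun i => E.contains i) c hcL (by simpa using hcE)
  have hmranks : m ∈ PySem.Set.inter (PySem.Set.ofList E) (PySem.Set.ofList L) := by
    simp only [PySem.Set.inter, List.mem_filter, PySem.Set.mem_ofList]
    exact ⟨by simpa using hpm, by simp [PySem.Set.mem_ofList, hmL]⟩
  cases hmx : PySem.List.max? (PySem.Set.inter (PySem.Set.ofList E) (PySem.Set.ofList L))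
      (fun c => List.idxOf c L) with
  | none =>
    rw [PySem.List.max?_eq_none_iff] at hmx
    rw [hmx] at hmranks
    simp at hmranks
  | some m' =>
    have hm'ranks := PySem.List.max?_mem hmx
    simp only [PySem.Set.inter, List.mem_filter, PySem.Set.mem_ofList] at hm'ranks
    have hm'L : m' ∈ L := by
      have := hm'ranks.2
      simpa [PySem.Set.mem_ofList] using this
    have hle1 : List.idxOf m' L ≤ List.idxOf m L :=
      hmax m' hm'L (by simpa using hm'ranks.1)
    have hle2 : List.idxOf m L ≤ List.idxOf m' L := PySem.List.max?_isMax hmx m hmranks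
    have hmm : m = m' := (List.idxOf_inj hmL).mp (le_antisymm hle2 hle1)
    rw [hfind, hmm]
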